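-- pv_equiv track=rewrite | github.com/stussysenik/cc-config | parse-history.py | analyze_prompt
-- ===== SOURCE A (Python) =====
-- def analyze_prompt(text):
--     """Categorize what kind of work a prompt represents."""
--     text_lower = text.lower() if text else ""
--
--     if any(x in text_lower for x in ['fix', 'bug', 'error', 'issue', 'broken', 'not working']):
--         return "debugging"
--     elif any(x in text_lower for x in ['add', 'create', 'build', 'implement', 'new feature']):
--         return "building"
--     elif any(x in text_lower for x in ['refactor', 'clean', 'improve', 'optimize']):
--         return "refactoring"
--     elif any(x in text_lower for x in ['test', 'spec', 'coverage']):
--         return "testing"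
--     elif any(x in text_lower for x in ['review', 'explain', 'understand', 'how does']):
--         return "learning"
--     elif any(x in text_lower for x in ['deploy', 'release', 'publish']):
--         return "deploying"
--     elif '/clear' in text_lower or len(text_lower) < 10:
--         return "command"
--     else:
--         return "coding"
-- ===== SOURCE B (Python) =====
-- # B: flat keyword->priority map scanned exhaustively with a min-priority reduction,
-- # instead of A's ordered short-circuit if/elif chain; same None->"" guard and fallback.
-- _GROUPS = [
--     ['fix', 'bug', 'error', 'issue', 'broken', 'not working'],
--     ['add', 'create', 'build', 'implement', 'new feature'],
--     ['refactor', 'clean', 'improve', 'optimize'],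
--     ['test', 'spec', 'coverage'],
--     ['review', 'explain', 'understand', 'how does'],
--     ['deploy', 'release', 'publish'],
-- ]
-- _CATS = ["debugging", "building", "refactoring", "testing", "learning", "deploying"]
-- _PRIORITY = {kw: p for p, kws in enumerate(_GROUPS) for kw in kws}
--
-- def analyze_prompt(text):
--     t = text.lower() if text else ""
--     best = None
--     for kw, p in _PRIORITY.items():
--         if kw in t:
--             best = p if best is None else min(best, p)
--     if best is not None:
--         return _CATS[best]
--     return "command" if '/clear' in t or len(t) < 10 else "coding"
-- ===== Notes on version B (the rewrite author's own statement) =====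
-- stated objective: alternative
-- what changed: Replaces the ordered short-circuit if/elif chain by an exhaustive scan over a flat keyword-to-priority map that reduces all matches with min, then maps the best priority to its category; the command/coding fallback fires when no keyword matched.
import Mathlib
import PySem

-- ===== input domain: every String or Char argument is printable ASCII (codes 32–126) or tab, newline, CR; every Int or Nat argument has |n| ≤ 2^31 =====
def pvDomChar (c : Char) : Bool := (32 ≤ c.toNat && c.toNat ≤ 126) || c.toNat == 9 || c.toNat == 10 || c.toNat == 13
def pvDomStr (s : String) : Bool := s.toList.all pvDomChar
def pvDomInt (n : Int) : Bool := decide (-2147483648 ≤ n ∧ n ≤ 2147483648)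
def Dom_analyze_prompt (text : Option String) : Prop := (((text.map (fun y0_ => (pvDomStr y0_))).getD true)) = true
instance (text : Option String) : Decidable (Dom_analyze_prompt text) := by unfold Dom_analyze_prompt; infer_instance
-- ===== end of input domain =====

-- B replaces A's ordered if/elif chain by an exhaustive scan of a flat keyword→priority
-- map with a min-priority reduction (objective: alternative).

-- ===== PORT A =====
def analyze_prompt (text : Option String) : String :=
  let text_lower : String :=
    match text with
    | none => ""
    | some s => if s == "" then "" else PySem.Str.lower s
  if (["fix", "bug", "error", "issue", "broken", "not working"]).any
      (fun x => PySem.Str.isIn x text_lower) then "debugging"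
  else if (["add", "create", "build", "implement", "new feature"]).any
      (fun x => PySem.Str.isIn x text_lower) then "building"
  else if (["refactor", "clean", "improve", "optimize"]).any
      (fun x => PySem.Str.isIn x text_lower) then "refactoring"
  else if (["test", "spec", "coverage"]).any
      (fun x => PySem.Str.isIn x text_lower) then "testing"
  else if (["review", "explain", "understand", "how does"]).any
      (fun x => PySem.Str.isIn x text_lower) then "learning"
  else if (["deploy", "release", "publish"]).any
      (fun x => PySem.Str.isIn x text_lower) then "deploying"
  else if PySem.Str.isIn "/clear" text_lower || decide (PySem.Str.len text_lower < 10) then "command"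
  else "coding"

-- ===== PORT B =====
def pvGroups : List (List String) :=
  [["fix", "bug", "error", "issue", "broken", "not working"],
   ["add", "create", "build", "implement", "new feature"],
   ["refactor", "clean", "improve", "optimize"],
   ["test", "spec", "coverage"],
   ["review", "explain", "understand", "how does"],
   ["deploy", "release", "publish"]]

def pvCats : List String :=
  ["debugging", "building", "refactoring", "testing", "learning", "deploying"]

-- dict comprehension {kw: p for p, kws in enumerate(_GROUPS) for kw in kws}; all keywords distinct
def pvPriority : List (String × Int) :=
  (PySem.List.enumerate pvGroups).flatMap (fun pk => pk.2.map (fun kw => (kw, pk.1)))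

-- the loop body of B's for-loop over _PRIORITY.items()
def pvStep (t : String) (best : Option Int) (kp : String × Int) : Option Int :=
  if PySem.Str.isIn kp.1 t then
    some (match best with | none => kp.2 | some m => min m kp.2)
  else best

def analyze_prompt_alt (text : Option String) : String :=
  let t : String :=
    match text with
    | none => ""
    | some s => if s == "" then "" else PySem.Str.lower s
  let best : Option Int := pvPriority.foldl (pvStep t) none
  match best with
  | some p => (PySem.List.pyGet? pvCats p).getD ""  -- _CATS[best]; best is always a valid index
  | none =>
    if PySem.Str.isIn "/clear" t || decide (PySem.Str.len t < 10) then "command"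
    else "coding"

-- ===== PRECONDITION & SPEC =====
def Spec_analyze_prompt (text : Option String) (out : String) : Prop := out = analyze_prompt_alt text
instance (text : Option String) (out : String) : Decidable (Spec_analyze_prompt text out) := by unfold Spec_analyze_prompt; infer_instance

-- ===== CLAIM (what is proved, stated in full; the proofs are below) =====
def Claim_equal_analyze_prompt : Prop := ∀ (text : Option String), Dom_analyze_prompt text → Spec_analyze_prompt text (analyze_prompt text)

-- ===== LEMMAS AND PROOFS =====

-- folding one keyword group (all with the same priority p, no smaller than anything already seen)
theorem pv_fold_group (t : String) (p : Int) (kws : List String) (acc : Option Int)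
    (h : ∀ m, acc = some m → m ≤ p) :
    (kws.map (fun kw => (kw, p))).foldl (pvStep t) acc
      = if kws.any (fun x => PySem.Str.isIn x t) then some (acc.getD p) else acc := by
  induction kws generalizing acc with
  | nil => simp
  | cons k rest ih =>
    simp only [List.map_cons, List.foldl_cons, List.any_cons]
    by_cases hk : PySem.Str.isIn k t
    · cases acc with
      | none =>
        rw [show pvStep t none (k, p) = some p from by unfold pvStep; rw [if_pos hk]]
        rw [ih (some p) (fun m hm => by injection hm with h'; omega)]
        simp only [hk, Bool.true_or, if_true, Option.getD_some, Option.getD_none, ite_self]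
      | some m =>
        have hmp : m ≤ p := h m rfl
        rw [show pvStep t (some m) (k, p) = some m from by
              unfold pvStep; rw [if_pos hk]; exact congrArg some (min_eq_left hmp)]
        rw [ih (some m) h]
        simp only [hk, Bool.true_or, Option.getD_some, ite_self]
    · rw [show pvStep t acc (k, p) = acc from by unfold pvStep; rw [if_neg hk]]
      rw [ih acc h]
      rw [Bool.not_eq_true] at hk
      simp only [hk, Bool.false_or]

-- A's chain equals B's min-reduction, for any lowered text t
theorem pv_main (t : String) :
    (if (["fix", "bug", "error", "issue", "broken", "not working"]).any
        (fun x => PySem.Str.isIn x t) then "debugging"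
     else if (["add", "create", "build", "implement", "new feature"]).any
        (fun x => PySem.Str.isIn x t) then "building"
     else if (["refactor", "clean", "improve", "optimize"]).any
        (fun x => PySem.Str.isIn x t) then "refactoring"
     else if (["test", "spec", "coverage"]).any
        (fun x => PySem.Str.isIn x t) then "testing"
     else if (["review", "explain", "understand", "how does"]).any
        (fun x => PySem.Str.isIn x t) then "learning"
     else if (["deploy", "release", "publish"]).any
        (fun x => PySem.Str.isIn x t) then "deploying"
     else if PySem.Str.isIn "/clear" t || decide (PySem.Str.len t < 10) then "command"
     else "coding")
    = (match pvPriority.foldl (pvStep t) none with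
       | some p => (PySem.List.pyGet? pvCats p).getD ""
       | none =>
         if PySem.Str.isIn "/clear" t || decide (PySem.Str.len t < 10) then "command"
         else "coding") := by
  rw [show pvPriority =
      (["fix", "bug", "error", "issue", "broken", "not working"].map (fun kw => (kw, (0:Int)))) ++
      (["add", "create", "build", "implement", "new feature"].map (fun kw => (kw, (1:Int)))) ++
      (["refactor", "clean", "improve", "optimize"].map (fun kw => (kw, (2:Int)))) ++
      (["test", "spec", "coverage"].map (fun kw => (kw, (3:Int)))) ++
      (["review", "explain", "understand", "how does"].map (fun kw => (kw, (4:Int)))) ++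
      (["deploy", "release", "publish"].map (fun kw => (kw, (5:Int)))) from by decide]
  rw [List.foldl_append, List.foldl_append, List.foldl_append, List.foldl_append,
      List.foldl_append]
  have side : ∀ (p q : Int), p ≤ q → ∀ (acc : Option Int), (∀ m, acc = some m → m ≤ p) →
      ∀ (b : Bool) (m : Int), (if b then some (acc.getD p) else acc) = some m → m ≤ q := by
    intro p q hpq acc hacc b m hm
    cases b with
    | true =>
      injection hm with h'
      cases acc with
      | none => simp only [Option.getD_none] at h'; omega
      | some a => have := hacc a rfl; simp only [Option.getD_some] at h'; omega
    | false => have := hacc m hm; omega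
  have base : ∀ m, (none : Option Int) = some m → m ≤ 0 := fun m hm => by cases hm
  rw [pv_fold_group t 0 _ none base]
  rw [pv_fold_group t 1 _ _ (side 0 1 (by norm_num) none base _)]
  rw [pv_fold_group t 2 _ _ (side 1 2 (by norm_num) _ (side 0 1 (by norm_num) none base _) _)]
  rw [pv_fold_group t 3 _ _ (side 2 3 (by norm_num) _ (side 1 2 (by norm_num) _ (side 0 1 (by norm_num) none base _) _) _)]
  rw [pv_fold_group t 4 _ _ (side 3 4 (by norm_num) _ (side 2 3 (by norm_num) _ (side 1 2 (by norm_num) _ (side 0 1 (by norm_num) none base _) _) _) _)]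
  rw [pv_fold_group t 5 _ _ (side 4 5 (by norm_num) _ (side 3 4 (by norm_num) _ (side 2 3 (by norm_num) _ (side 1 2 (by norm_num) _ (side 0 1 (by norm_num) none base _) _) _) _) _)]
  by_cases h0 : (["fix", "bug", "error", "issue", "broken", "not working"]).any (fun x => PySem.Str.isIn x t) <;>
  by_cases h1 : (["add", "create", "build", "implement", "new feature"]).any (fun x => PySem.Str.isIn x t) <;>
  by_cases h2 : (["refactor", "clean", "improve", "optimize"]).any (fun x => PySem.Str.isIn x t) <;>
  by_cases h3 : (["test", "spec", "coverage"]).any (fun x => PySem.Str.isIn x t) <;>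
  by_cases h4 : (["review", "explain", "understand", "how does"]).any (fun x => PySem.Str.isIn x t) <;>
  by_cases h5 : (["deploy", "release", "publish"]).any (fun x => PySem.Str.isIn x t) <;>
    simp only [h0, h1, h2, h3, h4, h5, if_true, Option.getD_some, Option.getD_none] <;> rfl

-- ===== VERDICT (by name: the statement is the Claim_ definition above) =====
theorem analyze_prompt_spec : Claim_equal_analyze_prompt := by
  intro text _
  unfold Spec_analyze_prompt analyze_prompt analyze_prompt_alt
  exact pv_main _
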